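/- GENERATED by mk_final_copies.py from the proof of the farm's unit `start_decoder.R1a` (farm:start_decoder.R1a.1: Proof.lean) as the
   re-elaboration sweep compiled it — do not edit. -/
import Asan.CheckWalk
import Vorbis.Spec.Reader
import Vorbis.Spec.Units.start_decoder_R1a

open X86 X86.User Asan Vorbis Vorbis.Spec Vorbis.Spec.StartDecoder

set_option maxRecDepth 4000
set_option maxHeartbeats 4000000

namespace Vorbis.Spec.start_decoder_R1a

/-- **Segment R1a of `start_decoder`** (0x1158f8 … 0x115900, returns into `cut231` 0x115905): `get_bits(f, 6)` is called with its
precondition (`shadowPre_call`, `readerEnv_mid`, `Bits` over the pushed return address by `Reader.reader_of_window`) and returns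
`z < 64`; the point `SecPt … 6 6 7 A.1 A` is carried over the push and the reader's footprint by `SecPt.carry` (every window a `MidWin`:
the stack below the steady rsp, the reader's fields of `*f`), `Bits` from the reader's post. -/
theorem segR1a_walk {Lay : Layout} (hLay : Lay.hi = 0x1000000) {μ : Microarch} (hμ : UserX.MicroOK μ) {u₀ : State}
    (hcode : HasCodeNat Lay u₀ Vorbis.L.start_decoder.entry Vorbis.Code.code_start_decoder.nat Vorbis.L.start_decoder.size)
    (h_get_bits : ∀ (others : List Obj) (frames : List (Nat × FrameLayout)) (Blk : Block → Prop) (len : Nat),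
      Calls Lay μ Vorbis.WayInv (Vorbis.conv u₀) Vorbis.L.get_bits.entry (Vorbis.Spec.get_bits.spec others frames Blk len))
    {g : Ghost} {v : State} {A : Arena × List Obj} (hb : BodyR1 u₀ g A v) :
    ReachVia Lay μ WayInv v (fun w => AtR1a u₀ g w) := by
  have hfr := hb.frame
  have hh := hb.hand
  -- SD.6 with the zero rest weakened to start at `mapping_count`: the point of the whole segment
  have hm : Mid g 6 6 7 A.1 A v.mem := hb.mid.weaken_rest (by decide)
  have hpt : SecPt u₀ g pc_R1 6 6 7 A.1 A v := ⟨hfr, hh, hm, hb.rbp⟩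
  have hp : Pos g A := hpt.pos
  have he := hfr.entry
  v_entry he
  obtain ⟨hRa, hR8⟩ := hfr.r_eq
  simp only [steady, Ghost.RA] at hRa
  simp only [depth] at he_room he_stack
  have hf2 := hp.f_hi
  have hf3 := hp.f_stack
  simp only [Ghost.RA] at hf3
  have hRn : (addr g.R).toNat = g.R := toNat_addr _ (by omega)
  have hfn : (addr g.f).toNat = g.f := toNat_addr _ (by omega)
  have w_rip := hfr.rip
  have c_rsp := hfr.rsp
  have c_rbp := hb.rbp
  have w_eq : Mem.EqOn Vorbis.L.textLo Vorbis.L.textHi u₀.mem v.mem := hfr.code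
  have hdf : v.flags .df = false := (show abiInv _ from hfr.inv).1
  have hmx : v.mxcsr &&& 0x1F80 = 0x1F80 := (show abiInv _ from hfr.inv).2
  have hsse := Vorbis.sseOK_of_abiInv hfr.inv
  have hgb := h_get_bits A.2 g.frames' (g.Blk A) g.len
  u_walk hcode [hμ.vendor] until [Vorbis.L.start_decoder.cut231] span [Vorbis.L.textLo, Vorbis.L.textHi] side (v_side)
  case call_inv => v_inv
  case pre_115900 =>
    have hun : ShadowUntouched v.mem s_115900.mem := by v_untouched
    have hs0 : Mem.SameExcept [⟨g.R - 8, g.R⟩] v.mem s_115900.mem := by u_same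
    have hbits := (Vorbis.Spec.Reader.reader_of_window hm.bits hs0 (by omega)).1
    refine ⟨⟨shadowPre_call hfr (by rw [w_rsp]; u_omega) hun, ?_, ?_⟩, ?_⟩
    · rw [w_rdi, hfn]
      exact readerEnv_mid hh hm
    · rw [w_rdi, hfn]
      exact hbits
    · rw [bitsArg_def, w_rsi]
      decide
  -- the returned state (0x115905)
  v_after_call w_rsp_115900 w_mem_115900
  simp only [w_rdi_115900, hfn] at w_same
  have hs : Mem.SameExcept [⟨g.R - 360, g.R⟩, ⟨g.f + 48, g.f + 56⟩, ⟨g.f + 84, g.f + 96⟩, ⟨g.f + 136, g.f + 144⟩,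
      ⟨g.f + 1484, g.f + 1749⟩, ⟨g.f + 1752, g.f + 1784⟩] v.mem s_115900r.mem := by
    u_same
  have hws : ∀ w, w ∈ [(⟨g.R - 360, g.R⟩ : Span), ⟨g.f + 48, g.f + 56⟩, ⟨g.f + 84, g.f + 96⟩, ⟨g.f + 136, g.f + 144⟩,
      ⟨g.f + 1484, g.f + 1749⟩, ⟨g.f + 1752, g.f + 1784⟩] → MidWin g 6 7 A.1 A w := by
    intro w hw
    simp only [List.mem_cons, List.mem_nil_iff, or_false] at hw
    unfold MidWin
    rcases hw with rfl | rfl | rfl | rfl | rfl | rfl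
    · left
      simp only []
      omega
    · right; right; right; left
      simp only []
      omega
    · right; right; right; left
      simp only []
      omega
    · right; right; right; right; left
      simp only []
      omega
    · right; right; right; right; right; right; left
      simp only []
      omega
    · right; right; right; right; right; right; right; left
      simp only []
      omega
  have hpost : GetBitsSpecPost (g.Blk A) g.len (s_115900.reg .rdi).toNat (bitsArg s_115900) s_115900 s_115900r := w_post
  rw [w_rdi_115900, hfn, bitsArg_def, w_rsi_115900] at hpost
  have hun : ShadowUntouched v.mem s_115900r.mem := by v_untouched
  have hpt' : SecPt u₀ g Vorbis.L.start_decoder.cut231 6 6 7 A.1 A s_115900r :=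
    hpt.carry hs hun hws hpost.bits.bits w_rip w_rsp (Vorbis.conv_code_eqOn w_code) w_inv (by rw [w_kept.get .rbp rfl])
  refine ReachVia.done ⟨A, hpt', ?_⟩
  exact hpost.bits.result.2 (by decide)

end Vorbis.Spec.start_decoder_R1a

/-- The unit `start_decoder.R1a`: `segR1a_walk` at every entry state. -/
theorem Vorbis.Spec.Worked.start_decoder_R1a_ok : Vorbis.Spec.start_decoder_R1a.Statement := by
  intro Lay hLay μ hμ u₀ hcode h_get_bits g v hat
  obtain ⟨A, hb⟩ := hat
  exact Vorbis.Spec.start_decoder_R1a.segR1a_walk hLay hμ hcode h_get_bits hb
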